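-- pv_equiv track=rewrite | github.com/hldai/aspectex | applyrules.py | __filter_sub_terms
-- ===== SOURCE A (Python) =====
-- def __filter_sub_terms(terms):
--     terms_sys_tmp = list(terms)
--     terms_sys_tmp.sort(key=lambda x: len(x))
--     terms_new = list()
--     for i, t in enumerate(terms_sys_tmp):
--         sub_term = False
--         for j in range(i + 1, len(terms_sys_tmp)):
--             if t in terms_sys_tmp[j]:
--                 sub_term = True
--                 break
--         if not sub_term:
--             terms_new.append(t)
--     return terms_new
-- ===== SOURCE B (Python) =====
-- def __filter_sub_terms(terms):
--     xs = sorted(terms, key=len)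
--     kept = []
--     for t in reversed(xs):
--         if not any(t in k for k in kept):
--             kept.append(t)
--     return kept[::-1]
-- ===== Notes on version B (the rewrite author's own statement) =====
-- stated objective: simpler
-- what changed: B scans the length-sorted list longest-first, keeping a term only if it is not a substring of an already-kept (substring-maximal) term, then reverses; A instead compares each term against every longer term remaining in the sorted list.
import Mathlib
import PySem

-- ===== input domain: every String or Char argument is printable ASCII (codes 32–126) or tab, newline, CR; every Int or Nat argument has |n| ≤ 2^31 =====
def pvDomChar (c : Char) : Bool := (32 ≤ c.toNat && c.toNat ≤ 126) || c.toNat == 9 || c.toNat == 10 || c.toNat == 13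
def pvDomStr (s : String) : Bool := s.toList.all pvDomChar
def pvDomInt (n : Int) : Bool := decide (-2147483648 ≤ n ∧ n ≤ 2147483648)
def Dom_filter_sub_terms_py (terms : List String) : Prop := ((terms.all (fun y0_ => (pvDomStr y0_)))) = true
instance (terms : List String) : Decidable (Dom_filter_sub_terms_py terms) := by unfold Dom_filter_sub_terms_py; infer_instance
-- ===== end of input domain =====

-- B keeps only substring-maximal terms by scanning the length-sorted list longest-first
-- against the already-kept terms; same return value as A, stated ascending-length like A's.

-- ===== PORT A =====
def filter_sub_terms_py (terms : List String) : List String :=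
  let terms_sys_tmp := PySem.List.sorted terms (fun x => PySem.Str.len x)
  (PySem.List.enumerate terms_sys_tmp).foldl
    (fun terms_new p =>
      let sub_term := (PySem.List.pyRange (p.1 + 1) (terms_sys_tmp.length : Int)).any
        (fun j => PySem.Str.isIn p.2 (PySem.List.pyGetD terms_sys_tmp j ""))
      if sub_term then terms_new else terms_new ++ [p.2]) []

-- ===== PORT B =====
def filter_sub_terms_py_alt (terms : List String) : List String :=
  let xs := PySem.List.sorted terms (fun x => PySem.Str.len x)
  let kept := xs.reverse.foldl
    (fun kept t => if kept.any (fun k => PySem.Str.isIn t k) then kept else kept ++ [t]) []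
  kept.reverse

-- ===== PRECONDITION & SPEC =====
def Spec_filter_sub_terms_py (terms : List String) (out : List String) : Prop := out = filter_sub_terms_py_alt terms
instance (terms : List String) (out : List String) : Decidable (Spec_filter_sub_terms_py terms out) := by unfold Spec_filter_sub_terms_py; infer_instance

-- ===== CLAIM (what is proved, stated in full; the proofs are below) =====
def Claim_equal_filter_sub_terms_py : Prop := ∀ (terms : List String), Dom_filter_sub_terms_py terms → Spec_filter_sub_terms_py terms (filter_sub_terms_py terms)

-- ===== LEMMAS AND PROOFS =====

-- the common filtered value both loops compute on the sorted list: keep t iff no later term contains it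
def pvFA : List String → List String
  | [] => []
  | t :: rest => if rest.any (fun s => PySem.Str.isIn t s) then pvFA rest else t :: pvFA rest

lemma pvIsIn_trans {t s u : String} (h1 : PySem.Str.isIn t s = true)
    (h2 : PySem.Str.isIn s u = true) : PySem.Str.isIn t u = true := by
  rw [PySem.Str.isIn_iff_infix] at h1 h2 ⊢
  exact h1.trans h2

-- checking against the survivors only is the same as checking against all later terms
lemma pvFA_any (t : String) : ∀ rest : List String,
    (pvFA rest).any (fun s => PySem.Str.isIn t s) = rest.any (fun s => PySem.Str.isIn t s)
  | [] => rfl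
  | s :: rest => by
    simp only [pvFA]
    by_cases h : rest.any (fun u => PySem.Str.isIn s u) = true
    · rw [if_pos h, pvFA_any t rest, List.any_cons]
      cases hts : PySem.Str.isIn t s
      · rw [Bool.false_or]
      · have hr : rest.any (fun u => PySem.Str.isIn t u) = true := by
          simp only [List.any_eq_true] at h ⊢
          obtain ⟨u, hu, hsu⟩ := h
          exact ⟨u, hu, pvIsIn_trans hts hsu⟩
        rw [hr, Bool.true_or]
    · rw [if_neg h, List.any_cons, List.any_cons, pvFA_any t rest]

-- A's indexed loop over the sorted list computes pvFA
lemma pvLoopA (full : List String) : ∀ (fuel n : Nat) (acc : List String), full.length ≤ n + fuel →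
    (PySem.List.enumerate (full.drop n) (n : Int)).foldl
      (fun terms_new p =>
        let sub_term := (PySem.List.pyRange (p.1 + 1) (full.length : Int)).any
          (fun j => PySem.Str.isIn p.2 (PySem.List.pyGetD full j ""))
        if sub_term then terms_new else terms_new ++ [p.2]) acc
    = acc ++ pvFA (full.drop n)
  | 0, n, acc, h => by
    have hd : full.drop n = [] := List.drop_eq_nil_of_le (by omega)
    simp [hd, PySem.List.enumerate_nil, pvFA]
  | fuel + 1, n, acc, h => by
    cases hd : full.drop n with
    | nil => simp [PySem.List.enumerate_nil, pvFA]
    | cons t rest =>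
      have hrest : full.drop (n + 1) = rest := by
        rw [← List.tail_drop, hd, List.tail_cons]
      have hlen : n < full.length := by
        by_contra hn
        rw [List.drop_eq_nil_of_le (by omega)] at hd
        exact absurd hd.symm (List.cons_ne_nil t rest)
      have hany : (PySem.List.pyRange ((n : Int) + 1) (full.length : Int)).any
            (fun j => PySem.Str.isIn t (PySem.List.pyGetD full j ""))
          = rest.any (fun s => PySem.Str.isIn t s) := by
        have hmap := PySem.List.map_pyGetD_pyRange' full "" (a := (n : Int) + 1) (by omega)
        have ht : ((n : Int) + 1).toNat = n + 1 := by omega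
        rw [ht, hrest] at hmap
        rw [← hmap, List.any_map]
        rfl
      rw [PySem.List.enumerate_cons, List.foldl_cons]
      simp only [hany]
      have hcast : (n : Int) + 1 = ((n + 1 : Nat) : Int) := by push_cast; ring
      by_cases hc : rest.any (fun s => PySem.Str.isIn t s) = true
      · rw [if_pos hc, hcast, ← hrest, pvLoopA full fuel (n + 1) acc (by omega), hrest]
        simp only [pvFA]
        rw [if_pos hc]
      · rw [if_neg hc, hcast, ← hrest, pvLoopA full fuel (n + 1) (acc ++ [t]) (by omega), hrest]
        simp only [pvFA]
        rw [if_neg hc]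
        simp

-- B's backward scan builds pvFA reversed
lemma pvFoldrB : ∀ xs : List String,
    xs.foldr (fun t kept => if kept.any (fun k => PySem.Str.isIn t k) then kept else kept ++ [t]) []
    = (pvFA xs).reverse
  | [] => rfl
  | t :: rest => by
    rw [List.foldr_cons, pvFoldrB rest]
    simp only [pvFA]
    rw [List.any_reverse, pvFA_any t rest]
    by_cases h : rest.any (fun s => PySem.Str.isIn t s) = true
    · rw [if_pos h, if_pos h]
    · rw [if_neg h, if_neg h]
      simp

-- ===== VERDICT (by name: the statement is the Claim_ definition above) =====
theorem filter_sub_terms_py_spec : Claim_equal_filter_sub_terms_py := by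
  intro terms _
  unfold Spec_filter_sub_terms_py
  simp only [filter_sub_terms_py, filter_sub_terms_py_alt]
  rw [List.foldl_reverse, pvFoldrB, List.reverse_reverse]
  have := pvLoopA (PySem.List.sorted terms (fun x => PySem.Str.len x))
    ((PySem.List.sorted terms (fun x => PySem.Str.len x)).length) 0 [] (by omega)
  simpa using this
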